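-- pv_equiv track=rewrite | github.com/daniilperestoronin/smoo-alg | algorithm.py | multipl_conv_opt_pr
-- ===== SOURCE A (Python) =====
-- def multipl_conv_opt_pr(unc_crt):
--     cr_n = len(unc_crt)
--     rows = len(unc_crt[0])
--     cols = len(unc_crt[0][0])
--     opt_dec = []
--     opt_dic_val = []
--     for i in range(0, cols):
--         max_cr = None
--         max_c = 0
--         for j in range(0, rows):
--             cr_mult = 1
--             for cr in range(0, cr_n):
--                 cr_mult = cr_mult * unc_crt[cr][j][i]
--             if max_cr is None or max_cr <= cr_mult:
--                 max_cr = cr_mult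
--                 max_c = j + 1
--         opt_dic_val.append(max_cr)
--         opt_dec.append(max_c)
--     return opt_dec, opt_dic_val
-- ===== SOURCE B (Python) =====
-- def multipl_conv_opt_pr(unc_crt):
--     rows = len(unc_crt[0])
--     cols = len(unc_crt[0][0])
--     # pass 1: products table accumulated layer by layer with zips
--     table = [[1] * cols for _ in range(rows)]
--     for layer in unc_crt:
--         table = [[p * v for p, v in zip(trow, lrow)]
--                  for trow, lrow in zip(table, layer)]
--     # pass 2: per column, materialize the column, take the builtin max,
--     # and locate its LAST occurrence via an index search on the reversed column
--     opt_dec = []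
--     opt_dic_val = []
--     for i in range(cols):
--         col = [row[i] for row in table]
--         m = max(col)
--         k = col[::-1].index(m)
--         opt_dec.append(rows - k)
--         opt_dic_val.append(m)
--     return opt_dec, opt_dic_val
-- ===== Notes on version B (the rewrite author's own statement) =====
-- stated objective: alternative
-- what changed: B replaces A's single triple-nested streaming argmax loop by two differently-shaped passes: a products table accumulated layer-by-layer with zips (bulk row multiplications instead of per-cell index arithmetic), then per column a builtin max plus a reversed-list index search that finds the last maximal row (matching A's <= tie rule) instead of A's running Option best/index state.
import Mathlib
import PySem

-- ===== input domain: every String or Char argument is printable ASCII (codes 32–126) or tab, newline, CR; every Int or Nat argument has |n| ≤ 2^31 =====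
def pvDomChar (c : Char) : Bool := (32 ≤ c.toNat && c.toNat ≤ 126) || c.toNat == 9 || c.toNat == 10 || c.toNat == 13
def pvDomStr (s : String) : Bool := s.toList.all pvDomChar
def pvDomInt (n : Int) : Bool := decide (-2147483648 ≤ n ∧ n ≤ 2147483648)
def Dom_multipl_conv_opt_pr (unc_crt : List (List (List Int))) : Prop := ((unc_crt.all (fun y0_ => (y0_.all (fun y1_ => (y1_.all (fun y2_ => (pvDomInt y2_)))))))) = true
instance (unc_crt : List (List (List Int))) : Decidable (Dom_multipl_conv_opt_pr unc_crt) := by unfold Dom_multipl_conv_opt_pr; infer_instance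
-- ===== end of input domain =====

-- B replaces A's streaming triple-nested argmax loop by two differently-shaped passes
-- (a zip-accumulated products table, then per column a builtin max plus a reversed-list
-- index search for the last maximal row); objective: alternative decomposition, same cost.

-- ===== PORT A =====
-- literal port of A; pyGetD's defaults are only reached where Python raises (excluded by Pre_),
-- and the final .getD 0 on max_cr is only reached when rows = 0 (excluded by Pre_).
def multipl_conv_opt_pr (unc_crt : List (List (List Int))) : List Int × List Int :=
  let cr_n : Int := unc_crt.length
  let rows : Int := (PySem.List.pyGetD unc_crt 0 []).length
  let cols : Int := (PySem.List.pyGetD (PySem.List.pyGetD unc_crt 0 []) 0 []).length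
  (PySem.List.pyRange 0 cols 1).foldl
    (fun (acc : List Int × List Int) i =>
      let st :=
        (PySem.List.pyRange 0 rows 1).foldl
          (fun (st : Option Int × Int) j =>
            let cr_mult :=
              (PySem.List.pyRange 0 cr_n 1).foldl
                (fun m cr =>
                  m * PySem.List.pyGetD (PySem.List.pyGetD (PySem.List.pyGetD unc_crt cr []) j []) i 0) 1
            match st.1 with
            | none => (some cr_mult, j + 1)
            | some mc => if mc ≤ cr_mult then (some cr_mult, j + 1) else st)
          (none, 0)
      (acc.1 ++ [st.2], acc.2 ++ [st.1.getD 0]))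
    ([], [])

-- ===== PORT B =====
-- literal port of Source B; max(col) and col[::-1].index(m) never raise under Pre_ (rows ≥ 1,
-- m ∈ col), so the .getD defaults are unreached there.
def multipl_conv_opt_pr_alt (unc_crt : List (List (List Int))) : List Int × List Int :=
  let rows : Int := (PySem.List.pyGetD unc_crt 0 []).length
  let cols : Int := (PySem.List.pyGetD (PySem.List.pyGetD unc_crt 0 []) 0 []).length
  let table : List (List Int) :=
    unc_crt.foldl
      (fun tb layer => List.zipWith (fun trow lrow => List.zipWith (· * ·) trow lrow) tb layer)
      (List.replicate rows.toNat (List.replicate cols.toNat 1))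
  (PySem.List.pyRange 0 cols 1).foldl
    (fun (acc : List Int × List Int) i =>
      let col := table.map (fun row => PySem.List.pyGetD row i 0)
      let m := (PySem.List.max? col (fun y => y)).getD 0
      let k : Nat := (PySem.List.index? ((PySem.List.slice? col none none (-1)).getD []) m).getD 0
      (acc.1 ++ [rows - (k : Int)], acc.2 ++ [m]))
    ([], [])

-- ===== PRECONDITION & SPEC =====
-- Pre_ is exactly the inputs on which A returns without raising: a nonempty first layer
-- (rows/cols are read from it) and, unless cols = 0 (then A's loops never index anything),
-- every layer at least `rows` rows, each of the first `rows` rows with at least `cols` entries.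
def Pre_multipl_conv_opt_pr (unc_crt : List (List (List Int))) : Prop :=
  unc_crt ≠ [] ∧ unc_crt.headD [] ≠ [] ∧
  (((unc_crt.headD []).headD []).length = 0 ∨
    ∀ l ∈ unc_crt, (unc_crt.headD []).length ≤ l.length ∧
      ∀ r ∈ l.take (unc_crt.headD []).length, ((unc_crt.headD []).headD []).length ≤ r.length)
instance (unc_crt : List (List (List Int))) : Decidable (Pre_multipl_conv_opt_pr unc_crt) := by
  unfold Pre_multipl_conv_opt_pr; infer_instance
def pvWitness_multipl_conv_opt_pr : List (List (List Int)) := [[[2, -1], [3, 5]]]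

def Spec_multipl_conv_opt_pr (unc_crt : List (List (List Int))) (out : List Int × List Int) : Prop := out = multipl_conv_opt_pr_alt unc_crt
instance (unc_crt : List (List (List Int))) (out : List Int × List Int) : Decidable (Spec_multipl_conv_opt_pr unc_crt out) := by unfold Spec_multipl_conv_opt_pr; infer_instance

-- ===== CLAIM (what is proved, stated in full; the proofs are below) =====
def Claim_equal_multipl_conv_opt_pr : Prop := ∀ (unc_crt : List (List (List Int))), Dom_multipl_conv_opt_pr unc_crt → Pre_multipl_conv_opt_pr unc_crt → Spec_multipl_conv_opt_pr unc_crt (multipl_conv_opt_pr unc_crt)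

-- ===== LEMMAS AND PROOFS =====

-- loop shape: a loop appending one element to each of two lists is a pair of maps
theorem pvFoldPair {σ : Type} (f g : σ → Int) (xs : List σ) (as bs : List Int) :
    xs.foldl (fun acc x => (acc.1 ++ [f x], acc.2 ++ [g x])) (as, bs)
      = (as ++ xs.map f, bs ++ xs.map g) := by
  induction xs generalizing as bs with
  | nil => simp
  | cons x xs ih => simp [ih]

-- A's Option-seeded argmax scan over range(n) computes the maximum of the per-row values
-- together with (1 + the LAST index attaining it), i.e. exactly B's max / reversed-index pair
theorem pvScanMax (w : Int → Int) (n : Nat) (hn : 1 ≤ n) :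
    (PySem.List.pyRange 0 (n : Int) 1).foldl
      (fun (st : Option Int × Int) j =>
        match st.1 with
        | none => (some (w j), j + 1)
        | some mc => if mc ≤ w j then (some (w j), j + 1) else st) (none, 0)
    = (PySem.List.max? (((PySem.List.pyRange 0 (n : Int) 1).map w)) (fun y => y),
       (n : Int) - (((PySem.List.index? (((PySem.List.pyRange 0 (n : Int) 1).map w).reverse)
           ((PySem.List.max? (((PySem.List.pyRange 0 (n : Int) 1).map w)) (fun y => y)).getD 0)).getD 0 : Nat) : Int)) := by
  induction n with
  | zero => omega
  | succ n ih =>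
    by_cases h1 : 1 ≤ n
    · have hsplit : PySem.List.pyRange 0 ((n : Int) + 1) 1
          = PySem.List.pyRange 0 (n : Int) 1 ++ [(n : Int)] :=
        PySem.List.pyRange_one_succ_right (by exact_mod_cast Nat.zero_le n)
      -- name the old values / old fold
      obtain ⟨x, t, hx⟩ : ∃ x t, (PySem.List.pyRange 0 (n : Int) 1).map w = x :: t := by
        have : (PySem.List.pyRange 0 (n : Int) 1).map w ≠ [] := by
          have : ((PySem.List.pyRange 0 (n : Int) 1).map w).length = n := by
            simp [PySem.List.length_pyRange_one]
          intro hc; rw [hc] at this; simp at this; omega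
        exact List.exists_cons_of_ne_nil this
      have hmax : PySem.List.max? ((PySem.List.pyRange 0 (n : Int) 1).map w) (fun y => y)
          = some (t.foldl max x) := by rw [hx]; exact PySem.List.max?_id_cons ..
      set M := t.foldl max x with hM
      have hMmem : M ∈ (PySem.List.pyRange 0 (n : Int) 1).map w :=
        PySem.List.max?_mem (by rw [hmax])
      obtain ⟨k, hk⟩ : ∃ k, PySem.List.index? (((PySem.List.pyRange 0 (n : Int) 1).map w).reverse) M = some k := by
        have hiff := PySem.List.index?_isSome_iff (xs := (((PySem.List.pyRange 0 (n : Int) 1).map w).reverse)) (v := M)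
        exact Option.isSome_iff_exists.mp (hiff.mpr (by simpa using hMmem))
      push_cast
      rw [hsplit, List.foldl_append, List.map_append, ih h1]
      simp only [List.map_cons, List.map_nil]
      rw [hmax] at ih ⊢
      simp only [Option.getD_some] at *
      rw [hk] at ih ⊢
      simp only [Option.getD_some] at *
      -- one more step of A's scan, and the new max / reversed index
      have hmax' : PySem.List.max? ((PySem.List.pyRange 0 (n : Int) 1).map w ++ [w (n : Int)]) (fun y => y)
          = some (max M (w (n : Int))) := by
        rw [hx]; rw [show (x :: t) ++ [w (n:Int)] = x :: (t ++ [w (n:Int)]) from rfl]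
        rw [PySem.List.max?_id_cons, List.foldl_append]; simp [hM]
      have hrev : ((PySem.List.pyRange 0 (n : Int) 1).map w ++ [w (n : Int)]).reverse
          = w (n : Int) :: ((PySem.List.pyRange 0 (n : Int) 1).map w).reverse := by simp
      by_cases hle : M ≤ w (n : Int)
      · have hmx : max M (w (n : Int)) = w (n : Int) := by omega
        rw [hmax', hmx, hrev]
        simp only [Option.getD_some, PySem.List.index?_cons_self]
        simp only [List.foldl_cons, List.foldl_nil]
        simp [hle]
      · have hmx : max M (w (n : Int)) = M := by omega
        have hne : w (n : Int) ≠ M := by omega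
        rw [hmax', hmx, hrev]
        simp only [Option.getD_some]
        rw [PySem.List.index?_cons_of_ne _ hne, hk]
        simp only [List.foldl_cons, List.foldl_nil, Option.map_some, Option.getD_some]
        simp [hle]
    · -- n = 0 : base case, range(1) = [0]
      have hn0 : n = 0 := by omega
      subst hn0
      rw [show (((0 : Nat) + 1 : Nat) : Int) = (0 : Int) + 1 by norm_num] at *
      rw [PySem.List.pyRange_one_singleton]
      simp [List.foldl, PySem.List.max?_id_cons]

theorem pvZipGetD (a b : List Int) (i : Nat) (h1 : i < a.length) (h2 : i < b.length) :
    (List.zipWith (· * ·) a b).getD i 0 = a.getD i 0 * b.getD i 0 := by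
  have hz : i < (List.zipWith (· * ·) a b).length := by
    simp [List.length_zipWith]; omega
  rw [List.getD_eq_getElem?_getD, List.getElem?_eq_getElem hz,
      List.getD_eq_getElem?_getD, List.getElem?_eq_getElem h1,
      List.getD_eq_getElem?_getD, List.getElem?_eq_getElem h2]
  simp [List.getElem_zipWith]

-- the products table built by zip-accumulation: shape and entries
theorem pvTable (M : List (List (List Int))) (tb : List (List Int)) (R C : Nat)
    (h1 : tb.length = R) (h2 : ∀ r ∈ tb, r.length = C)
    (hM : ∀ u ∈ M, R ≤ u.length ∧ ∀ r ∈ u.take R, C ≤ r.length) :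
    (M.foldl (fun t u => List.zipWith (fun a b => List.zipWith (· * ·) a b) t u) tb).length = R ∧
    (∀ r ∈ M.foldl (fun t u => List.zipWith (fun a b => List.zipWith (· * ·) a b) t u) tb, r.length = C) ∧
    ∀ j i : Nat, j < R → i < C →
      ((M.foldl (fun t u => List.zipWith (fun a b => List.zipWith (· * ·) a b) t u) tb).getD j []).getD i 0
        = M.foldl (fun m u => m * ((u.getD j []).getD i 0)) ((tb.getD j []).getD i 0) := by
  induction M generalizing tb with
  | nil => exact ⟨h1, h2, by simp⟩
  | cons u M ih =>
    obtain ⟨huR, huC⟩ := hM u (List.mem_cons_self ..)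
    have hulen : ∀ (k : Nat) (hku : k < u.length), k < R → C ≤ (u[k]'hku).length := by
      intro k hku hkR
      have hmem : u[k]'hku ∈ u.take R := by
        have hkt : k < (u.take R).length := by simp [List.length_take]; omega
        have he : (u.take R)[k]'hkt = u[k]'hku := List.getElem_take
        rw [← he]; exact List.getElem_mem hkt
      exact huC _ hmem
    have hlen : (List.zipWith (fun a b => List.zipWith (· * ·) a b) tb u).length = R := by
      simp [List.length_zipWith, h1]; omega
    have hrows : ∀ r ∈ List.zipWith (fun a b => List.zipWith (· * ·) a b) tb u, r.length = C := by
      intro r hr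
      obtain ⟨k, hk, rfl⟩ := List.mem_iff_getElem.mp hr
      have hkR : k < R := by rw [hlen] at hk; exact hk
      have hku : k < u.length := lt_of_lt_of_le hkR huR
      have hkt : k < tb.length := by omega
      have htbk : (tb[k]'hkt).length = C := h2 _ (List.getElem_mem hkt)
      have huk : C ≤ (u[k]'hku).length := hulen k hku hkR
      simp [List.getElem_zipWith, List.length_zipWith]
      omega
    have hent : ∀ j i : Nat, j < R → i < C →
        (((List.zipWith (fun a b => List.zipWith (· * ·) a b) tb u).getD j []).getD i 0)
          = (tb.getD j []).getD i 0 * ((u.getD j []).getD i 0) := by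
      intro j i hj hi
      have hju : j < u.length := lt_of_lt_of_le hj huR
      have hjt : j < tb.length := by omega
      have hjz : j < (List.zipWith (fun a b => List.zipWith (· * ·) a b) tb u).length := by
        rw [hlen]; exact hj
      have hz : (List.zipWith (fun a b => List.zipWith (· * ·) a b) tb u).getD j [] =
          List.zipWith (· * ·) (tb[j]'hjt) (u[j]'hju) := by
        rw [List.getD_eq_getElem?_getD, List.getElem?_eq_getElem hjz, Option.getD_some,
            List.getElem_zipWith]
      have ht : tb.getD j [] = tb[j]'hjt := by
        rw [List.getD_eq_getElem?_getD, List.getElem?_eq_getElem hjt, Option.getD_some]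
      have hu : u.getD j [] = u[j]'hju := by
        rw [List.getD_eq_getElem?_getD, List.getElem?_eq_getElem hju, Option.getD_some]
      rw [hz, ht, hu]
      exact pvZipGetD _ _ i (by rw [h2 _ (List.getElem_mem hjt)]; exact hi)
        (by have := hulen j hju hj; omega)
    have hM' : ∀ u' ∈ M, R ≤ u'.length ∧ ∀ r ∈ u'.take R, C ≤ r.length := by
      intro u' hu'; exact hM u' (List.mem_cons_of_mem _ hu')
    obtain ⟨ihl, ihr, ihe⟩ := ih _ hlen hrows hM'
    refine ⟨by simpa using ihl, by simpa using ihr, ?_⟩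
    intro j i hj hi
    simp only [List.foldl_cons]
    rw [ihe j i hj hi, hent j i hj hi]

-- both outputs are the two components of the same per-column function
theorem pvPipeline (xs : List Int) (FA : Int → Option Int × Int) (FB : Int → Int × Int)
    (h : ∀ i ∈ xs, FA i = (some (FB i).1, (FB i).2)) :
    xs.foldl (fun acc i => (acc.1 ++ [(FA i).2], acc.2 ++ [(FA i).1.getD 0])) (([] : List Int), ([] : List Int))
      = xs.foldl (fun acc i => (acc.1 ++ [(FB i).2], acc.2 ++ [(FB i).1])) ([], []) := by
  rw [pvFoldPair (f := fun i => (FA i).2) (g := fun i => (FA i).1.getD 0),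
      pvFoldPair (f := fun i => (FB i).2) (g := fun i => (FB i).1)]
  simp only [List.nil_append, Prod.mk.injEq]
  constructor <;> (apply List.map_congr_left; intro i hi; simp [h i hi])

-- ===== VERDICT (by name: the statement is the Claim_ definition above) =====
theorem multipl_conv_opt_pr_spec : Claim_equal_multipl_conv_opt_pr := by
  intro unc_crt _ hpre
  obtain ⟨hne, h0, hsh⟩ := hpre
  obtain ⟨l0, L, rfl⟩ := List.exists_cons_of_ne_nil hne
  have h0' : l0 ≠ [] := by simpa using h0
  obtain ⟨r0, rs, rfl⟩ := List.exists_cons_of_ne_nil h0'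
  simp only [List.headD_cons] at hsh
  unfold Spec_multipl_conv_opt_pr multipl_conv_opt_pr multipl_conv_opt_pr_alt
  simp only [PySem.List.pyGetD_zero_cons, Int.toNat_natCast]
  refine pvPipeline (PySem.List.pyRange 0 ((r0.length : Nat) : Int) 1)
    (fun i => List.foldl
        (fun (st : Option Int × Int) j =>
          match st.1 with
          | none => (some (List.foldl (fun m cr => m * PySem.List.pyGetD (PySem.List.pyGetD (PySem.List.pyGetD ((r0 :: rs) :: L) cr []) j []) i 0) 1 (PySem.List.pyRange 0 ((((r0 :: rs) :: L).length : Nat) : Int) 1)), j + 1)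
          | some mc => if mc ≤ List.foldl (fun m cr => m * PySem.List.pyGetD (PySem.List.pyGetD (PySem.List.pyGetD ((r0 :: rs) :: L) cr []) j []) i 0) 1 (PySem.List.pyRange 0 ((((r0 :: rs) :: L).length : Nat) : Int) 1) then (some (List.foldl (fun m cr => m * PySem.List.pyGetD (PySem.List.pyGetD (PySem.List.pyGetD ((r0 :: rs) :: L) cr []) j []) i 0) 1 (PySem.List.pyRange 0 ((((r0 :: rs) :: L).length : Nat) : Int) 1)), j + 1) else st)
        (none, 0) (PySem.List.pyRange 0 (((r0 :: rs).length : Nat) : Int) 1))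
    (fun i =>
      ((PySem.List.max? (List.map (fun row => PySem.List.pyGetD row i 0) (List.foldl (fun tb layer => List.zipWith (fun trow lrow => List.zipWith (· * ·) trow lrow) tb layer) (List.replicate (r0 :: rs).length (List.replicate r0.length 1)) ((r0 :: rs) :: L))) (fun y => y)).getD 0,
       (((r0 :: rs).length : Nat) : Int) - (((PySem.List.index? ((PySem.List.slice? (List.map (fun row => PySem.List.pyGetD row i 0) (List.foldl (fun tb layer => List.zipWith (fun trow lrow => List.zipWith (· * ·) trow lrow) tb layer) (List.replicate (r0 :: rs).length (List.replicate r0.length 1)) ((r0 :: rs) :: L))) none none (-1)).getD []) ((PySem.List.max? (List.map (fun row => PySem.List.pyGetD row i 0) (List.foldl (fun tb layer => List.zipWith (fun trow lrow => List.zipWith (· * ·) trow lrow) tb layer) (List.replicate (r0 :: rs).length (List.replicate r0.length 1)) ((r0 :: rs) :: L))) (fun y => y)).getD 0)).getD 0 : Nat) : Int)))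
    ?_
  intro i hi
  obtain ⟨hi0, hiC⟩ := PySem.List.mem_pyRange_one.mp hi
  obtain ⟨ii, rfl⟩ : ∃ ii : Nat, i = (ii : Int) := ⟨i.toNat, (Int.toNat_of_nonneg hi0).symm⟩
  have hiiC : ii < r0.length := by exact_mod_cast hiC
  dsimp only
  have hsh : ∀ l ∈ (r0 :: rs) :: L, (r0 :: rs).length ≤ l.length ∧
      ∀ r ∈ List.take (r0 :: rs).length l, r0.length ≤ r.length :=
    hsh.resolve_left (by omega)
  -- the products table: entries are A's per-cell products
  obtain ⟨e1, -, e3⟩ := pvTable ((r0 :: rs) :: L)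
    (List.replicate (r0 :: rs).length (List.replicate r0.length 1)) (r0 :: rs).length r0.length
    (by simp) (by intro r hr; simp [List.eq_of_mem_replicate hr]) hsh
  have htab : ∀ jj : Int, 0 ≤ jj → jj < ((r0 :: rs).length : Int) →
      PySem.List.pyGetD (PySem.List.pyGetD (List.foldl (fun tb layer => List.zipWith (fun trow lrow => List.zipWith (· * ·) trow lrow) tb layer) (List.replicate (r0 :: rs).length (List.replicate r0.length 1)) ((r0 :: rs) :: L)) jj []) (ii : Int) 0
      = List.foldl (fun m cr => m * PySem.List.pyGetD (PySem.List.pyGetD (PySem.List.pyGetD ((r0 :: rs) :: L) cr []) jj []) (ii : Int) 0) 1 (PySem.List.pyRange 0 ((((r0 :: rs) :: L).length : Nat) : Int) 1) := by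
    intro jj hj0 hjR
    obtain ⟨j, rfl⟩ : ∃ j : Nat, jj = (j : Int) := ⟨jj.toNat, (Int.toNat_of_nonneg hj0).symm⟩
    have hjR' : j < (r0 :: rs).length := by exact_mod_cast hjR
    rw [PySem.List.foldl_pyRange_zero_pyGetD' ((r0 :: rs) :: L) []
      (fun m u => m * PySem.List.pyGetD (PySem.List.pyGetD u (j : Int) []) (ii : Int) 0) 1]
    simp only [PySem.List.pyGetD_natCast]
    have hj' : j ≤ rs.length := by simpa [Nat.lt_succ_iff] using hjR'
    simpa [List.getD_eq_getElem?_getD, List.getElem?_replicate, hjR', hiiC, hj'] using e3 j ii hjR' hiiC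
  -- B's column is exactly A's per-row product values
  have hcol : List.map (fun row => PySem.List.pyGetD row (ii : Int) 0) (List.foldl (fun tb layer => List.zipWith (fun trow lrow => List.zipWith (· * ·) trow lrow) tb layer) (List.replicate (r0 :: rs).length (List.replicate r0.length 1)) ((r0 :: rs) :: L))
      = (PySem.List.pyRange 0 (((r0 :: rs).length : Nat) : Int) 1).map (fun j => List.foldl (fun m cr => m * PySem.List.pyGetD (PySem.List.pyGetD (PySem.List.pyGetD ((r0 :: rs) :: L) cr []) j []) (ii : Int) 0) 1 (PySem.List.pyRange 0 ((((r0 :: rs) :: L).length : Nat) : Int) 1)) := by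
    have hTr := PySem.List.map_pyGetD_pyRange_zero' (List.foldl (fun tb layer => List.zipWith (fun trow lrow => List.zipWith (· * ·) trow lrow) tb layer) (List.replicate (r0 :: rs).length (List.replicate r0.length 1)) ((r0 :: rs) :: L)) ([] : List Int)
    conv_lhs => rw [← hTr]
    rw [List.map_map, e1]
    apply List.map_congr_left
    intro jj hj
    obtain ⟨hj0, hjR⟩ := PySem.List.mem_pyRange_one.mp hj
    simpa [Function.comp] using htab jj hj0 hjR
  rw [PySem.List.slice?_none_none_neg_one]
  simp only [Option.getD_some]
  rw [hcol]
  -- A's scan is the max / last-argmax pair (pvScanMax), which is B's pair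
  rw [pvScanMax (fun j => List.foldl (fun m cr => m * PySem.List.pyGetD (PySem.List.pyGetD (PySem.List.pyGetD ((r0 :: rs) :: L) cr []) j []) (ii : Int) 0) 1 (PySem.List.pyRange 0 ((((r0 :: rs) :: L).length : Nat) : Int) 1)) (r0 :: rs).length (Nat.succ_le_succ (Nat.zero_le _))]
  have hvne : ((PySem.List.pyRange 0 (((r0 :: rs).length : Nat) : Int) 1).map (fun j => List.foldl (fun m cr => m * PySem.List.pyGetD (PySem.List.pyGetD (PySem.List.pyGetD ((r0 :: rs) :: L) cr []) j []) (ii : Int) 0) 1 (PySem.List.pyRange 0 ((((r0 :: rs) :: L).length : Nat) : Int) 1))) ≠ [] := by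
    intro hc
    have := congrArg List.length hc
    simp [PySem.List.length_pyRange_one] at this
  obtain ⟨x, t, hx⟩ := List.exists_cons_of_ne_nil hvne
  rw [hx, PySem.List.max?_id_cons]
  simp
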